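-- pv_equiv track=rewrite | github.com/Anusha-Kanagala/Algorithms | Python programs/numbers_codesignal.py | helper
-- ===== SOURCE A (Python) =====
-- def helper(numbers, str,i):
--     num_len = len(numbers)
--     if str == "even_first" and i < num_len:
--         for i in (i, num_len-1):
--             if numbers[i] % 2 != 0:
--                 return helper(numbers,"odd_first",i+1)
--             else:
--                 return i
--     elif str == "odd_first" and i < num_len:
--         for i in (i, num_len-1):
--             if numbers[i] % 2 == 0:
--                 return helper(numbers,"even_first",i+1)
--             else:
--                 return i
--     else:
--         return -1
-- ===== SOURCE B (Python) =====
-- def helper(numbers, str, i):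
--     # Iterative loop with an alternating-parity flag instead of mutual tail recursion.
--     if str != "even_first" and str != "odd_first":
--         return -1
--     expect_even = (str == "even_first")
--     n = len(numbers)
--     while i < n:
--         if (numbers[i] % 2 == 0) == expect_even:
--             return i
--         expect_even = not expect_even
--         i += 1
--     return -1
-- ===== Notes on version B (the rewrite author's own statement) =====
-- stated objective: simpler
-- what changed: The mutual tail recursion with a dead inner for-loop is replaced by a single iterative while-loop over an expect_even flag that flips on each mismatch.
import Mathlib
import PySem

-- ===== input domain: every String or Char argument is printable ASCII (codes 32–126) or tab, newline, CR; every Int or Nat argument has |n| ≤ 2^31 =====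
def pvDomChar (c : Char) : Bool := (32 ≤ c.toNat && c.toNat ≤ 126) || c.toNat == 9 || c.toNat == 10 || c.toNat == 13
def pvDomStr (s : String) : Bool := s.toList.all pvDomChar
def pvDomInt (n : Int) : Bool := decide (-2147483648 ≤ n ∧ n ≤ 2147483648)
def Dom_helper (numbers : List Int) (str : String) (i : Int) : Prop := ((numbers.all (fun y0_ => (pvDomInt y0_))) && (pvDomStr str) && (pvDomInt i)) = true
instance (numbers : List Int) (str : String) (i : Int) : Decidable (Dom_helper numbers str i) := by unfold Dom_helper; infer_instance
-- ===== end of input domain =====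

-- B replaces A's mutual tail recursion (with a dead inner for-loop) by one iterative
-- loop over a flipping expect_even flag; objective: simpler.


-- ===== PORT A =====
-- Literal transliteration of A; the inner 'for i in (i, num_len-1)' always returns on
-- its first iteration, so each branch reads numbers[i] once. 'none' from pyGet?
-- (IndexError) is outside Pre_; the port returns 0 there.
def helper (numbers : List Int) (str : String) (i : Int) : Int :=
  if h : str = "even_first" ∧ i < (numbers.length : Int) then
    match PySem.List.pyGet? numbers i with
    | some v => if PySem.Int.mod v 2 ≠ 0 then helper numbers "odd_first" (i + 1) else i
    | none => 0
  else if h2 : str = "odd_first" ∧ i < (numbers.length : Int) then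
    match PySem.List.pyGet? numbers i with
    | some v => if PySem.Int.mod v 2 = 0 then helper numbers "even_first" (i + 1) else i
    | none => 0
  else
    -1
termination_by ((numbers.length : Int) - i).toNat
decreasing_by
  · omega
  · omega

-- ===== PORT B =====
-- The while-loop of Source B: expect_even flag, flipped on each mismatch.
def helperLoopB (numbers : List Int) (expectEven : Bool) (i : Int) : Int :=
  if h : i < (numbers.length : Int) then
    match PySem.List.pyGet? numbers i with
    | some v =>
        if (PySem.Int.mod v 2 == 0) = expectEven then i
        else helperLoopB numbers (!expectEven) (i + 1)
    | none => 0
  else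
    -1
termination_by ((numbers.length : Int) - i).toNat
decreasing_by omega

def helper_alt (numbers : List Int) (str : String) (i : Int) : Int :=
  if str ≠ "even_first" ∧ str ≠ "odd_first" then -1
  else helperLoopB numbers (str == "even_first") i

-- ===== PRECONDITION & SPEC =====
-- Pre_ excludes exactly the inputs on which the Python A raises IndexError
-- (a valid mode with i < -len(numbers), where numbers[i] is out of range).
def Pre_helper (numbers : List Int) (str : String) (i : Int) : Prop :=
  (str = "even_first" ∨ str = "odd_first") → -(numbers.length : Int) ≤ i
instance (numbers : List Int) (str : String) (i : Int) : Decidable (Pre_helper numbers str i) := by unfold Pre_helper; infer_instance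

def pvWitness_helper : List Int × String × Int := ([2, 3, 5], "even_first", 0)

def Spec_helper (numbers : List Int) (str : String) (i : Int) (out : Int) : Prop := out = helper_alt numbers str i
instance (numbers : List Int) (str : String) (i : Int) (out : Int) : Decidable (Spec_helper numbers str i out) := by unfold Spec_helper; infer_instance

-- ===== CLAIM (what is proved, stated in full; the proofs are below) =====
def Claim_equal_helper : Prop := ∀ (numbers : List Int) (str : String) (i : Int), Dom_helper numbers str i → Pre_helper numbers str i → Spec_helper numbers str i (helper numbers str i)

-- ===== LEMMAS AND PROOFS =====

-- A with a valid mode equals B's loop with the corresponding flag (for every i;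
-- both return 0 on the out-of-range none-branch, so no precondition is needed).
theorem helper_eq_loop (numbers : List Int) :
    ∀ i : Int, helper numbers "even_first" i = helperLoopB numbers true i ∧
               helper numbers "odd_first" i = helperLoopB numbers false i := by
  have key : ∀ n : Nat, ∀ i : Int, ((numbers.length : Int) - i).toNat ≤ n →
      helper numbers "even_first" i = helperLoopB numbers true i ∧
      helper numbers "odd_first" i = helperLoopB numbers false i := by
    intro n
    induction n with
    | zero =>
      intro i hn
      have hge : ¬ i < (numbers.length : Int) := by omega
      constructor
      · rw [helper, helperLoopB, dif_neg (by tauto), dif_neg (by tauto), dif_neg hge]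
      · rw [helper, helperLoopB, dif_neg (by simp), dif_neg (by tauto), dif_neg hge]
    | succ m ih =>
      intro i hn
      by_cases hlt : i < (numbers.length : Int)
      · have hrec := ih (i + 1) (by omega)
        have hbeq : ∀ w : Int, ((PySem.Int.mod w 2 == 0) = true) ↔ PySem.Int.mod w 2 = 0 := by
          intro w; exact beq_iff_eq
        constructor
        · rw [helper, helperLoopB, dif_pos ⟨rfl, hlt⟩, dif_pos hlt]
          cases hv : PySem.List.pyGet? numbers i with
          | none => rfl
          | some v =>
            dsimp only
            by_cases hm : PySem.Int.mod v 2 = 0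
            · rw [if_neg (by simpa using hm), if_pos ((hbeq v).mpr hm)]
            · rw [if_pos hm, if_neg (by simpa [hbeq v] using hm)]
              exact hrec.2
        · rw [helper, helperLoopB, dif_neg (by simp), dif_pos ⟨rfl, hlt⟩, dif_pos hlt]
          cases hv : PySem.List.pyGet? numbers i with
          | none => rfl
          | some v =>
            dsimp only
            by_cases hm : PySem.Int.mod v 2 = 0
            · rw [if_pos hm, if_neg (by simpa [hbeq v] using hm)]
              exact hrec.1
            · rw [if_neg hm, if_pos (by simpa [hbeq v] using hm)]
      · have hge := hlt
        constructor
        · rw [helper, helperLoopB, dif_neg (by tauto), dif_neg (by tauto), dif_neg hge]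
        · rw [helper, helperLoopB, dif_neg (by simp), dif_neg (by tauto), dif_neg hge]
  intro i
  exact key ((numbers.length : Int) - i).toNat i le_rfl

-- ===== VERDICT (by name: the statement is the Claim_ definition above) =====
theorem helper_spec : Claim_equal_helper := by
  intro numbers str i _ _
  unfold Spec_helper helper_alt
  by_cases he : str = "even_first"
  · simp [he, (helper_eq_loop numbers i).1]
  · by_cases ho : str = "odd_first"
    · simp [ho, (helper_eq_loop numbers i).2]
    · rw [helper]
      simp [he, ho]
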